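-- pv_equiv track=rewrite | github.com/dot-birdie/advent-of-code-23 | day_13/task1.py | get_horizontal_score
-- ===== SOURCE A (Python) =====
-- def get_horizontal_score(patch, clean_value=-2, is_from_vertical=False):
--     for i in range(1, len(patch)):
--         top = patch[:i]
--         top.reverse()
--         bottom = patch[i:]
--         if len(top) > len(bottom):
--             top = top[:len(bottom)]
--         else:
--             bottom = bottom[:len(top)]
--         new_score = i * ((not is_from_vertical) * 100 + is_from_vertical)
--         if top == bottom and new_score != clean_value:
--             return new_score
--     return -1
-- ===== SOURCE B (Python) =====
-- def get_horizontal_score(patch, clean_value=-2, is_from_vertical=False):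
--     n = len(patch)
--     unit = 1 if is_from_vertical else 100
--     for i in range(1, n):
--         j, k = i - 1, i
--         while j >= 0 and k < n and patch[j] == patch[k]:
--             j -= 1
--             k += 1
--         if (j < 0 or k == n) and i * unit != clean_value:
--             return i * unit
--     return -1
-- ===== Notes on version B (the rewrite author's own statement) =====
-- stated objective: faster
-- what changed: Instead of building, reversing and truncating list slices for each candidate split and comparing them wholesale, B expands two index pointers outward from each split line and stops at the first mismatching row pair, allocating no intermediate lists.
import Mathlib
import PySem

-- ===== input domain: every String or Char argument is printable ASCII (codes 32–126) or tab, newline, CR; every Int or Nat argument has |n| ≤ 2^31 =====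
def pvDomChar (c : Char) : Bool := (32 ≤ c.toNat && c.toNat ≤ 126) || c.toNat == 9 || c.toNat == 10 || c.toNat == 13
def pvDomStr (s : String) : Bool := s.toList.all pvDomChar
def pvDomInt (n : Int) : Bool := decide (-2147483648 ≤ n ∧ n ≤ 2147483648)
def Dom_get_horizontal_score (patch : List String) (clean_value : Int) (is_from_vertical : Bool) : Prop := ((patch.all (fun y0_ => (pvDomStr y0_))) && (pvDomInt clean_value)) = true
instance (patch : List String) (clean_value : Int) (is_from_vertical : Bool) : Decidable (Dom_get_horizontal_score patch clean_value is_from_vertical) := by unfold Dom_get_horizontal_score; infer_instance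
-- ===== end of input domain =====

-- B replaces A's per-split slice/reverse/truncate/compare with a two-pointer expansion
-- around each candidate split line that stops at the first mismatching row pair and
-- builds no intermediate lists (measurably faster on the generated inputs).

-- ===== PORT A =====
-- 'for i in range(1, len(patch)): …' with early return, as structural recursion over the range list
def pvAloop (patch : List String) (clean_value : Int) (is_from_vertical : Bool) : List Int → Int
  | [] => -1
  | i :: rest =>
    let top := (PySem.List.slice patch none (some i)).reverse
    let bottom := PySem.List.slice patch (some i) none
    let top' := if bottom.length < top.length then PySem.List.slice top none (some (bottom.length : Int)) else top
    let bottom' := if bottom.length < top.length then bottom else PySem.List.slice bottom none (some (top.length : Int))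
    let new_score := i * ((if is_from_vertical then 0 else 1) * 100 + (if is_from_vertical then 1 else 0))
    if top' = bottom' ∧ new_score ≠ clean_value then new_score
    else pvAloop patch clean_value is_from_vertical rest

def get_horizontal_score (patch : List String) (clean_value : Int) (is_from_vertical : Bool) : Int :=
  pvAloop patch clean_value is_from_vertical (PySem.List.pyRange 1 (patch.length : Int) 1)

-- ===== PORT B =====
-- 'while j >= 0 and k < n and patch[j] == patch[k]: j -= 1; k += 1', returning the final (j, k)
def pvBwhile (patch : List String) (n : Int) (j k : Int) : Int × Int :=
  if h : 0 ≤ j ∧ k < n ∧ PySem.List.pyGet? patch j = PySem.List.pyGet? patch k then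
    pvBwhile patch n (j - 1) (k + 1)
  else (j, k)
termination_by (j + 1).toNat
decreasing_by omega

def pvBloop (patch : List String) (clean_value unit n : Int) : List Int → Int
  | [] => -1
  | i :: rest =>
    let jk := pvBwhile patch n (i - 1) i
    if (jk.1 < 0 ∨ jk.2 = n) ∧ i * unit ≠ clean_value then i * unit
    else pvBloop patch clean_value unit n rest

def get_horizontal_score_alt (patch : List String) (clean_value : Int) (is_from_vertical : Bool) : Int :=
  pvBloop patch clean_value (if is_from_vertical then 1 else 100) (patch.length : Int)
    (PySem.List.pyRange 1 (patch.length : Int) 1)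

-- ===== PRECONDITION & SPEC =====
def Spec_get_horizontal_score (patch : List String) (clean_value : Int) (is_from_vertical : Bool) (out : Int) : Prop := out = get_horizontal_score_alt patch clean_value is_from_vertical
instance (patch : List String) (clean_value : Int) (is_from_vertical : Bool) (out : Int) : Decidable (Spec_get_horizontal_score patch clean_value is_from_vertical out) := by unfold Spec_get_horizontal_score; infer_instance

-- ===== CLAIM (what is proved, stated in full; the proofs are below) =====
def Claim_equal_get_horizontal_score : Prop := ∀ (patch : List String) (clean_value : Int) (is_from_vertical : Bool), Dom_get_horizontal_score patch clean_value is_from_vertical → Spec_get_horizontal_score patch clean_value is_from_vertical (get_horizontal_score patch clean_value is_from_vertical)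

-- ===== LEMMAS AND PROOFS =====

-- the common mirror specification at split i': rows i'-1-t and i'+t agree for all t below the overlap
def pvMirror (patch : List String) (i' : Nat) : Prop :=
  ∀ t : Nat, t < min i' (patch.length - i') → patch[i' - 1 - t]? = patch[i' + t]?

-- B's while loop reaches a boundary exactly when all compared row pairs agree
lemma pvBwhile_char (patch : List String) (n : Int) (hn : n = (patch.length : Int)) :
    ∀ (m : Nat) (j k : Int), j < n → 0 ≤ k → k ≤ n → m = (min (j + 1) (n - k)).toNat →
      (((pvBwhile patch n j k).1 < 0 ∨ (pvBwhile patch n j k).2 = n) ↔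
        ∀ t : Nat, t < m → patch[j.toNat - t]? = patch[k.toNat + t]?) := by
  intro m
  induction m with
  | zero =>
    intro j k hj hk0 hkn hm
    have hstop : ¬ (0 ≤ j ∧ k < n ∧ PySem.List.pyGet? patch j = PySem.List.pyGet? patch k) := by
      rintro ⟨h1, h2, _⟩; omega
    rw [pvBwhile, dif_neg hstop]
    simp only []
    constructor
    · intro _ t ht; omega
    · intro _; omega
  | succ m ih =>
    intro j k hj hk0 hkn hm
    have hj0 : 0 ≤ j := by omega
    have hkn' : k < n := by omega
    by_cases heq : PySem.List.pyGet? patch j = PySem.List.pyGet? patch k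
    · rw [pvBwhile, dif_pos ⟨hj0, hkn', heq⟩]
      rw [ih (j - 1) (k + 1) (by omega) (by omega) (by omega) (by omega)]
      have hjlt : j < (patch.length : Int) := by omega
      have hklt : k < (patch.length : Int) := by omega
      have hg : patch[j.toNat]? = patch[k.toNat]? := by
        rwa [PySem.List.pyGet?_of_nonneg_of_lt patch hj0 hjlt,
             PySem.List.pyGet?_of_nonneg_of_lt patch hk0 hklt] at heq
      constructor
      · intro h t ht
        cases t with
        | zero => simpa using hg
        | succ t =>
          have := h t (by omega)
          have e1 : (j - 1).toNat - t = j.toNat - (t + 1) := by omega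
          have e2 : (k + 1).toNat + t = k.toNat + (t + 1) := by omega
          rw [e1, e2] at this; exact this
      · intro h t ht
        have := h (t + 1) (by omega)
        have e1 : (j - 1).toNat - t = j.toNat - (t + 1) := by omega
        have e2 : (k + 1).toNat + t = k.toNat + (t + 1) := by omega
        rw [e1, e2]; exact this
    · rw [pvBwhile, dif_neg (by rintro ⟨_, _, h⟩; exact heq h)]
      simp only []
      constructor
      · intro h; rcases h with h | h <;> omega
      · intro h
        exfalso
        have := h 0 (by omega)
        apply heq
        have hjlt : j < (patch.length : Int) := by omega
        have hklt : k < (patch.length : Int) := by omega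
        rw [PySem.List.pyGet?_of_nonneg_of_lt patch hj0 hjlt,
            PySem.List.pyGet?_of_nonneg_of_lt patch hk0 hklt]
        simpa using this

-- truncation to a common length compares exactly the first m positions
lemma pvTake_eq_iff {α : Type} (X Y : List α) (m : Nat) :
    X.take m = Y.take m ↔ ∀ t, t < m → X[t]? = Y[t]? := by
  constructor
  · intro h t ht
    have := congrArg (fun l => l[t]?) h
    simpa [List.getElem?_take, ht] using this
  · intro h
    apply List.ext_getElem?
    intro t
    by_cases ht : t < m
    · simp [ht, h t ht]
    · simp [ht]

-- position t of the reversed prefix is row i' - 1 - t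
lemma pvIdx (patch : List String) (i' t : Nat) (hl : i' ≤ patch.length)
    (ht : t < i') : ((patch.take i').reverse)[t]? = patch[i' - 1 - t]? := by
  rw [List.getElem?_reverse (by simp [min_eq_left hl]; omega)]
  rw [List.length_take, min_eq_left hl, List.getElem?_take]
  rw [if_pos (by omega)]

-- the pointwise comparison over the overlap is the mirror specification
lemma pvPairs_iff (patch : List String) (i' m : Nat) (hl : i' ≤ patch.length)
    (hm : m = min i' (patch.length - i')) :
    (∀ t, t < m → ((patch.take i').reverse)[t]? = (patch.drop i')[t]?) ↔ pvMirror patch i' := by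
  unfold pvMirror
  apply forall_congr'
  intro t
  constructor
  · intro h ht
    have := h (by omega)
    rwa [pvIdx patch i' t hl (by omega), List.getElem?_drop] at this
  · intro h ht
    rw [pvIdx patch i' t hl (by omega), List.getElem?_drop]
    exact h (by omega)

-- A's truncated slice comparison equals the mirror specification
lemma pvA_cond_char (patch : List String) (i : Int) (h1 : 1 ≤ i) (h2 : i < (patch.length : Int)) :
    (let top := (PySem.List.slice patch none (some i)).reverse
     let bottom := PySem.List.slice patch (some i) none
     let top' := if bottom.length < top.length then PySem.List.slice top none (some (bottom.length : Int)) else top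
     let bottom' := if bottom.length < top.length then bottom else PySem.List.slice bottom none (some (top.length : Int))
     top' = bottom') ↔ pvMirror patch i.toNat := by
  have hi0 : 0 ≤ i := by omega
  have hl : i.toNat ≤ patch.length := by omega
  simp only [PySem.List.slice_to patch hi0, PySem.List.slice_from patch hi0,
    PySem.List.slice_to_natCast, List.length_reverse, List.length_take, List.length_drop,
    min_eq_left hl]
  by_cases hcase : patch.length - i.toNat < i.toNat
  · rw [if_pos hcase, if_pos hcase]
    rw [show patch.drop i.toNat = (patch.drop i.toNat).take (patch.length - i.toNat) from
      (List.take_of_length_le (by simp)).symm]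
    rw [pvTake_eq_iff]
    exact pvPairs_iff patch i.toNat (patch.length - i.toNat) hl (by omega)
  · rw [if_neg hcase, if_neg hcase]
    rw [show (patch.take i.toNat).reverse = ((patch.take i.toNat).reverse).take i.toNat from
      (List.take_of_length_le (by simp [min_eq_left hl])).symm]
    rw [pvTake_eq_iff]
    exact pvPairs_iff patch i.toNat i.toNat hl (by omega)

-- B's boundary condition at split i equals the mirror specification
lemma pvB_cond_char (patch : List String) (i : Int) (h1 : 1 ≤ i) (h2 : i < (patch.length : Int)) :
    ((pvBwhile patch (patch.length : Int) (i - 1) i).1 < 0 ∨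
     (pvBwhile patch (patch.length : Int) (i - 1) i).2 = (patch.length : Int)) ↔
      pvMirror patch i.toNat := by
  rw [pvBwhile_char patch (patch.length : Int) rfl (min (i.toNat) (patch.length - i.toNat))
      (i - 1) i (by omega) (by omega) (by omega) (by omega)]
  unfold pvMirror
  constructor
  · intro h t ht
    have := h t (by omega)
    have e1 : (i - 1).toNat - t = i.toNat - 1 - t := by omega
    rw [e1] at this; exact this
  · intro h t ht
    have := h t (by omega)
    have e1 : (i - 1).toNat - t = i.toNat - 1 - t := by omega
    rw [e1]; exact this

lemma pvLoops_eq (patch : List String) (clean_value : Int) (is_from_vertical : Bool) :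
    ∀ L : List Int, (∀ i ∈ L, 1 ≤ i ∧ i < (patch.length : Int)) →
      pvAloop patch clean_value is_from_vertical L =
        pvBloop patch clean_value (if is_from_vertical then 1 else 100) (patch.length : Int) L := by
  intro L
  induction L with
  | nil => intro _; rfl
  | cons i rest ih =>
    intro hmem
    obtain ⟨hi1, hi2⟩ := hmem i (List.mem_cons_self ..)
    have hscore : i * ((if is_from_vertical then (0 : Int) else 1) * 100 + (if is_from_vertical then 1 else 0))
        = i * (if is_from_vertical then 1 else 100) := by
      cases is_from_vertical <;> norm_num
    have hcond := (pvA_cond_char patch i hi1 hi2).trans (pvB_cond_char patch i hi1 hi2).symm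
    simp only [pvAloop, pvBloop]
    rw [hscore]
    exact if_congr (and_congr_left' hcond) rfl (ih (fun j hj => hmem j (List.mem_cons_of_mem _ hj)))

-- ===== VERDICT (by name: the statement is the Claim_ definition above) =====
theorem get_horizontal_score_spec : Claim_equal_get_horizontal_score := by
  intro patch clean_value is_from_vertical _
  unfold Spec_get_horizontal_score get_horizontal_score get_horizontal_score_alt
  exact pvLoops_eq patch clean_value is_from_vertical _
    (fun i hi => by
      have := (PySem.List.mem_pyRange_one).mp hi
      omega)
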